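-- pv_equiv track=rewrite | github.com/Climact/citycalc-model | patex/utils.py | generate_id_paths
-- ===== SOURCE A (Python) =====
-- def generate_id_paths(path, regions, modules, dtype):
--     """ Generate id paths based on the path, regions, modules and dtype
--
--     Args:
--     - path (str): Path to the parquet file
--     - regions (list, optional): List of regions to process
--     - modules (list, optional): List of modules to process
--     - dtype (str, optional): Data type to process
--
--     Returns:
--     - list: List of id paths
--     """
--
--     id_paths = [path]
--     if regions:
--         id_paths = [f"{id_path}_{region}" for id_path in id_paths for region in regions]
--     if modules:
--         id_paths = [f"{id_path}_{module}" for id_path in id_paths for module in modules]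
--     if dtype:
--         id_paths = [f"{id_path}_{dtype}" for id_path in id_paths]
--     return id_paths
-- ===== SOURCE B (Python) =====
-- def generate_id_paths(path, regions, modules, dtype):
--     """Cartesian-product formulation: collect the active factor pools, take one
--     generic product over them, then join each combo with '_'."""
--     components = [[path]]
--     if regions:
--         components.append(regions)
--     if modules:
--         components.append(modules)
--     combos = [[]]
--     for pool in components:
--         combos = [combo + [x] for combo in combos for x in pool]
--     id_paths = ['_'.join(str(x) for x in combo) for combo in combos]
--     if dtype:
--         id_paths = [f"{p}_{dtype}" for p in id_paths]
--     return id_paths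
-- ===== Notes on version B (the rewrite author's own statement) =====
-- stated objective: idiomatic
-- what changed: Replaces A's three hard-coded comprehension stages that grow strings incrementally with a generic cartesian product over a list of active factor pools, joining each resulting combo once with '_'.join.
import Mathlib
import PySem

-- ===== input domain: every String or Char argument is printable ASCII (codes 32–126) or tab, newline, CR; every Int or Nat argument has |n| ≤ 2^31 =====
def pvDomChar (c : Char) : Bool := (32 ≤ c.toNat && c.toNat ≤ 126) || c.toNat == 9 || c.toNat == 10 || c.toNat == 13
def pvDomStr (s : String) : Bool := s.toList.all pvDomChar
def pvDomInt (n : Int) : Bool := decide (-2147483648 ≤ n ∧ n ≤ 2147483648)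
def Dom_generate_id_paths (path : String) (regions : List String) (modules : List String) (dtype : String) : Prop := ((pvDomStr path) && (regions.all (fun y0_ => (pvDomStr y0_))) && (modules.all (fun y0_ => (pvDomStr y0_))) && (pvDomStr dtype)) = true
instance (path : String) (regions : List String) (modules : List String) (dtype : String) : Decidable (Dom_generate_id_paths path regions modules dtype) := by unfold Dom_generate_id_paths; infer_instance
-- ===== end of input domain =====

-- B replaces A's three hard-coded comprehension stages with one generic cartesian
-- product over the active factor pools followed by a single '_'.join (idiomatic; same cost).

-- ===== PORT A =====
-- literal transliteration of A: three conditional comprehension stages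
def generate_id_paths (path : String) (regions : List String) (modules : List String) (dtype : String) : List String :=
  let id_paths1 := [path]
  let id_paths2 := if regions = [] then id_paths1
    else id_paths1.flatMap (fun id_path => regions.map (fun region => id_path ++ "_" ++ region))
  let id_paths3 := if modules = [] then id_paths2
    else id_paths2.flatMap (fun id_path => modules.map (fun m => id_path ++ "_" ++ m))
  if dtype = "" then id_paths3 else id_paths3.map (fun id_path => id_path ++ "_" ++ dtype)

-- ===== PORT B =====
-- literal transliteration of Source B: build the pool list, one product fold, join each combo
def generate_id_paths_alt (path : String) (regions : List String) (modules : List String) (dtype : String) : List String :=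
  let c1 := [[path]]
  let c2 := if regions = [] then c1 else c1 ++ [regions]
  let components := if modules = [] then c2 else c2 ++ [modules]
  let combos := components.foldl
    (fun cs pool => cs.flatMap (fun combo => pool.map (fun x => combo ++ [x]))) [[]]
  let id_paths := combos.map (fun combo => PySem.Str.join "_" combo)
  if dtype = "" then id_paths else id_paths.map (fun p => p ++ "_" ++ dtype)

-- ===== PRECONDITION & SPEC =====
def Spec_generate_id_paths (path : String) (regions : List String) (modules : List String) (dtype : String) (out : List String) : Prop := out = generate_id_paths_alt path regions modules dtype
instance (path : String) (regions : List String) (modules : List String) (dtype : String) (out : List String) : Decidable (Spec_generate_id_paths path regions modules dtype out) := by unfold Spec_generate_id_paths; infer_instance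

-- ===== CLAIM (what is proved, stated in full; the proofs are below) =====
def Claim_equal_generate_id_paths : Prop := ∀ (path : String) (regions : List String) (modules : List String) (dtype : String), Dom_generate_id_paths path regions modules dtype → Spec_generate_id_paths path regions modules dtype (generate_id_paths path regions modules dtype)

-- ===== LEMMAS AND PROOFS =====

-- '_'.join on the small fixed-length combos the product produces
theorem join_one (a : String) : PySem.Str.join "_" [a] = a := by
  rw [← String.toList_inj, PySem.Str.toList_join]
  simp [PySem.Chars.join, List.intercalate]

theorem join_two (a b : String) : PySem.Str.join "_" [a, b] = a ++ "_" ++ b := by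
  rw [← String.toList_inj, PySem.Str.toList_join]
  simp [PySem.Chars.join, List.intercalate]

theorem join_three (a b c : String) : PySem.Str.join "_" [a, b, c] = a ++ "_" ++ b ++ "_" ++ c := by
  rw [← String.toList_inj, PySem.Str.toList_join]
  simp [PySem.Chars.join, List.intercalate]

-- ===== VERDICT (by name: the statement is the Claim_ definition above) =====
theorem generate_id_paths_spec : Claim_equal_generate_id_paths := by
  intro path regions modules dtype _
  unfold Spec_generate_id_paths generate_id_paths generate_id_paths_alt
  by_cases hr : regions = [] <;> by_cases hm : modules = [] <;>
    by_cases hd : dtype = "" <;>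
    simp [hr, hm, hd, List.foldl, join_one, join_two, join_three,
      List.flatMap_map, List.map_flatMap, Function.comp_def]
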